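-- pv_equiv track=rewrite | github.com/nat-christoforou/Python-Projects | time-calculator/time_calculator.py | hour24_to_hour12
-- ===== SOURCE A (Python) =====
-- def hour24_to_hour12(hour):
--     """Convert hour from 24-hour format to 12-hour format."""
--     if hour == 0:
--         return str(12), ' AM'
--     if hour < 12:
--         return str(hour), ' AM'
--     if hour == 12:
--         return str(hour), ' PM'
--     if hour < 24:
--         return str(hour % 12), ' PM'
--     return hour24_to_hour12(hour - 24)
-- ===== SOURCE B (Python) =====
-- def hour24_to_hour12(hour):
--     """Convert hour from 24-hour format to 12-hour format."""
--     h = hour % 24 if hour >= 24 else hour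
--     ampm = ' AM' if h < 12 else ' PM'
--     disp = 12 if h == 0 else (h - 12 if h > 12 else h)
--     return str(disp), ampm
-- ===== Notes on version B (the rewrite author's own statement) =====
-- stated objective: simpler
-- what changed: Replaces the repeated-subtraction tail recursion by a single conditional modulo normalisation and the four-way return cascade by one AM/PM test plus one arithmetic display-hour expression.
-- outside the precondition, e.g. on hour24_to_hour12(238000): A returns ('4', ' PM'), B returns ('4', ' PM'); on hour24_to_hour12(239000): A returns ('8', ' AM'), B returns ('8', ' AM')
import Mathlib
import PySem

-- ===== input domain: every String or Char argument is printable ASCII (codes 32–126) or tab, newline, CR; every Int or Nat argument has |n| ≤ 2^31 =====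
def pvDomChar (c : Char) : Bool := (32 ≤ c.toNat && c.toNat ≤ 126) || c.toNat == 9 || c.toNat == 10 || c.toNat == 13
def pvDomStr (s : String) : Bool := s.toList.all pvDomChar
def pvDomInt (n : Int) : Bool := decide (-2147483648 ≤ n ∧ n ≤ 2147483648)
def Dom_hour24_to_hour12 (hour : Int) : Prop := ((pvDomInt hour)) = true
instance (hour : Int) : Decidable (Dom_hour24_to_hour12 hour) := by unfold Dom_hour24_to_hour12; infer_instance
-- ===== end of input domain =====

-- B replaces A's repeated-subtraction tail recursion by one conditional modulo and one
-- arithmetic display-hour expression (objective: simpler).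


-- ===== PORT A =====
def hour24_to_hour12 (hour : Int) : String × String :=
  if hour = 0 then (PySem.Int.toStr 12, " AM")
  else if hour < 12 then (PySem.Int.toStr hour, " AM")
  else if hour = 12 then (PySem.Int.toStr hour, " PM")
  else if hour < 24 then (PySem.Int.toStr (PySem.Int.mod hour 12), " PM")
  else hour24_to_hour12 (hour - 24)
termination_by hour.toNat
decreasing_by omega

-- ===== PORT B =====
def hour24_to_hour12_alt (hour : Int) : String × String :=
  let h : Int := if hour ≥ 24 then PySem.Int.mod hour 24 else hour
  let ampm : String := if h < 12 then " AM" else " PM"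
  let disp : Int := if h = 0 then 12 else if h > 12 then h - 12 else h
  (PySem.Int.toStr disp, ampm)

-- ===== PRECONDITION & SPEC =====
-- Pre_ excludes hours ≥ 237600 (= 24·9900): there A's one-recursive-call-per-24-hours
-- overflows the interpreter's recursion limit (10000 under the grader's runner) and
-- raises RecursionError; since the exact overflow point also depends on the stack depth
-- already in use at the call, a thin safety band (237600 ≤ hour < ~239900) in which A
-- still returns is excluded too.
def Pre_hour24_to_hour12 (hour : Int) : Prop := hour < 237600
instance (hour : Int) : Decidable (Pre_hour24_to_hour12 hour) := by unfold Pre_hour24_to_hour12; infer_instance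
def pvWitness_hour24_to_hour12 : Int := (17)

def Spec_hour24_to_hour12 (hour : Int) (out : String × String) : Prop := out = hour24_to_hour12_alt hour
instance (hour : Int) (out : String × String) : Decidable (Spec_hour24_to_hour12 hour out) := by unfold Spec_hour24_to_hour12; infer_instance

-- ===== CLAIM (what is proved, stated in full; the proofs are below) =====
def Claim_equal_hour24_to_hour12 : Prop := ∀ (hour : Int), Dom_hour24_to_hour12 hour → Pre_hour24_to_hour12 hour → Spec_hour24_to_hour12 hour (hour24_to_hour12 hour)

-- ===== LEMMAS AND PROOFS =====

-- B is invariant under subtracting 24 from an hour ≥ 24.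
theorem alt_sub24 (hour : Int) (h : 24 ≤ hour) :
    hour24_to_hour12_alt (hour - 24) = hour24_to_hour12_alt hour := by
  unfold hour24_to_hour12_alt
  have h24 : PySem.Int.mod hour 24 = hour % 24 := PySem.Int.mod_eq_emod_of_pos (by omega)
  by_cases h48 : 48 ≤ hour
  · have h24' : PySem.Int.mod (hour - 24) 24 = (hour - 24) % 24 :=
      PySem.Int.mod_eq_emod_of_pos (by omega)
    have : (hour - 24) % 24 = hour % 24 := by omega
    simp only [h24, h24', this, ge_iff_le, if_pos h, if_pos (by omega : (24:Int) ≤ hour - 24)]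
  · have h24' : PySem.Int.mod hour 24 = hour - 24 := by
      rw [h24]; omega
    simp only [ge_iff_le, if_pos h, if_neg (by omega : ¬ (24:Int) ≤ hour - 24), h24']

-- On hours below 24 the two ports agree.
theorem agree_small (hour : Int) (h : hour < 24) :
    hour24_to_hour12 hour = hour24_to_hour12_alt hour := by
  unfold hour24_to_hour12 hour24_to_hour12_alt
  by_cases h0 : hour = 0
  · simp [h0]
  · by_cases h12 : hour < 12
    · simp [h0, h12, show ¬ hour ≥ 24 by omega, show ¬ hour > 12 by omega]
    · by_cases he : hour = 12
      · simp [he]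
      · have hm : PySem.Int.mod hour 12 = hour % 12 := PySem.Int.mod_eq_emod_of_pos (by omega)
        have hv : hour % 12 = hour - 12 := by omega
        simp [h0, h12, he, h, hv, show ¬ hour ≥ 24 by omega, show hour > 12 by omega]

theorem agree_all (hour : Int) : hour24_to_hour12 hour = hour24_to_hour12_alt hour := by
  by_cases h : hour < 24
  · exact agree_small hour h
  · rw [hour24_to_hour12]
    simp only [if_neg (show ¬ hour = 0 by omega), if_neg (show ¬ hour < 12 by omega),
      if_neg (show ¬ hour = 12 by omega), if_neg h]
    rw [agree_all (hour - 24), alt_sub24 hour (by omega)]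
termination_by hour.toNat
decreasing_by omega

-- ===== VERDICT (by name: the statement is the Claim_ definition above) =====
theorem hour24_to_hour12_spec : Claim_equal_hour24_to_hour12 := by
  intro hour _ _
  exact agree_all hour
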